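-- pv_equiv track=rewrite | github.com/zhenzuo2/PPP | code/TieDIE-tiedie2/lib/tiedie_util.py | mapUGraphToNetwork
-- ===== SOURCE A (Python) =====
-- def mapUGraphToNetwork(edge_list, network):
-- 	"""
-- 		Map undirected edges to the network to form a subnetwork
-- 		in the hash-key directed network format
--
-- 		Input:
-- 			edge_list: edges in (s,t) format
-- 			network: network in {source:set( (int, target), ... )
--
-- 		Returns:
-- 			Subnetwork in the data structure format of network input
-- 	"""
--
-- 	subnetwork = {}
--
-- 	for (s,t) in edge_list:
-- 		# find this equivalent edge(s) in the directed network
-- 		# edges: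
-- 		if s in network:
-- 			for (i, nt) in network[s]:
-- 				if nt == t:
-- 					if s not in subnetwork:
-- 						subnetwork[s] = set()
-- 					subnetwork[s].add((i,t))
--
-- 		if t in network:
-- 			for (i, nt) in network[t]:
-- 				if nt == s:
-- 					if t not in subnetwork:
-- 						subnetwork[t] = set()
-- 					subnetwork[t].add((i,s))
--
-- 	return subnetwork
-- ===== SOURCE B (Python) =====
-- def mapUGraphToNetwork(edge_list, network):
-- 	"""Index every directed network edge by its (source, target) pair once,
-- 	then answer each undirected edge by two index lookups."""
-- 	index = {}
-- 	for source, neighbors in network.items():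
-- 		for (i, nt) in neighbors:
-- 			index.setdefault((source, nt), []).append((i, nt))
--
-- 	subnetwork = {}
-- 	for (s, t) in edge_list:
-- 		for (src, dst) in ((s, t), (t, s)):
-- 			for hit in index.get((src, dst), ()):
-- 				if src not in subnetwork:
-- 					subnetwork[src] = set()
-- 				subnetwork[src].add(hit)
-- 	return subnetwork
-- ===== Notes on version B (the rewrite author's own statement) =====
-- stated objective: alternative
-- what changed: B builds a dictionary index from (source,target) pairs to the matching directed edges in one pass over the network, then resolves each undirected edge by two index lookups, instead of A's per-edge scan of each endpoint's full neighbor list.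
import Mathlib
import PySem

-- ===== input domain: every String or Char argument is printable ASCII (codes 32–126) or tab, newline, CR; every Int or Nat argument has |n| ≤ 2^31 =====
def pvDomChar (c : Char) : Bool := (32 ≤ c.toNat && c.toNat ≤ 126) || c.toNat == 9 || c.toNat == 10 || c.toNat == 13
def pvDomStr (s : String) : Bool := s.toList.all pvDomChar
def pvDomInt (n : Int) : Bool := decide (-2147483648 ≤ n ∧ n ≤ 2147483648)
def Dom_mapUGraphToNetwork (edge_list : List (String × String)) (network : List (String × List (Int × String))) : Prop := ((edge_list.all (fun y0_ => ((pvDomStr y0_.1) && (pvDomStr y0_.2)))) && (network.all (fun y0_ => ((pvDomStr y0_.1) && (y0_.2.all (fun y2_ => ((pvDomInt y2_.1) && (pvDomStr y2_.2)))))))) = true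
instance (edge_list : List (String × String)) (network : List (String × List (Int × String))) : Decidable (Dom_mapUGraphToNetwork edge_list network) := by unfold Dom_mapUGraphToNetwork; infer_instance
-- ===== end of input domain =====

-- B replaces A's per-edge scans of the endpoint neighbor lists by a (source,target)-keyed
-- index built once over the network, resolved by two lookups per undirected edge (objective: alternative).

-- shared helper: Python's
--   if key not in subnetwork: subnetwork[key] = set()
--   subnetwork[key].add(v)
-- (both Pythons contain exactly these lines)
def pvAddHit (sub : PySem.Dict String (List (Int × String))) (key : String) (v : Int × String) : PySem.Dict String (List (Int × String)) :=
  let sub := if sub.contains key then sub else sub.insert key PySem.Set.empty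
  sub.insert key (PySem.Set.add (sub.getD key PySem.Set.empty) v)

-- ===== PORT A =====
def mapUGraphToNetwork (edge_list : List (String × String)) (network : List (String × List (Int × String))) : List (String × List (Int × String)) :=
  (edge_list.foldl (fun sub st =>
    -- if s in network: for (i, nt) in network[s]: if nt == t: … add (i, t)
    let sub :=
      match (PySem.Dict.mk network).get? st.1 with
      | some nbrs => nbrs.foldl (fun sub p => if p.2 == st.2 then pvAddHit sub st.1 (p.1, st.2) else sub) sub
      | none => sub
    -- if t in network: for (i, nt) in network[t]: if nt == s: … add (i, s)
    match (PySem.Dict.mk network).get? st.2 with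
    | some nbrs => nbrs.foldl (fun sub p => if p.2 == st.1 then pvAddHit sub st.2 (p.1, st.1) else sub) sub
    | none => sub) PySem.Dict.empty).items

-- ===== PORT B =====
-- index.setdefault((source, nt), []).append((i, nt)) over all of network.items()
def pvBuildIndex (network : List (String × List (Int × String))) : PySem.Dict (String × String) (List (Int × String)) :=
  network.foldl (fun idx it =>
    it.2.foldl (fun idx p =>
      idx.insert (it.1, p.2) (idx.getD (it.1, p.2) [] ++ [p])) idx) PySem.Dict.empty

def mapUGraphToNetwork_alt (edge_list : List (String × String)) (network : List (String × List (Int × String))) : List (String × List (Int × String)) :=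
  let index := pvBuildIndex network
  (edge_list.foldl (fun sub st =>
    [(st.1, st.2), (st.2, st.1)].foldl (fun sub sd =>
      (index.getD sd []).foldl (fun sub hit => pvAddHit sub sd.1 hit) sub) sub) PySem.Dict.empty).items

-- ===== PRECONDITION & SPEC =====
-- Pre_ only rules out association lists with a duplicated network key: the Python `network` is a
-- dict, which cannot carry two entries for the same key, so no Python caller ever produces them.
def Pre_mapUGraphToNetwork (edge_list : List (String × String)) (network : List (String × List (Int × String))) : Prop :=
  (network.map Prod.fst).Nodup
instance (edge_list : List (String × String)) (network : List (String × List (Int × String))) : Decidable (Pre_mapUGraphToNetwork edge_list network) := by unfold Pre_mapUGraphToNetwork; infer_instance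

def pvWitness_mapUGraphToNetwork : (List (String × String)) × (List (String × List (Int × String))) :=
  ([("a", "b"), ("c", "a")], [("a", [(1, "b"), (2, "c")]), ("b", [(0, "a")])])

def Spec_mapUGraphToNetwork (edge_list : List (String × String)) (network : List (String × List (Int × String))) (out : List (String × List (Int × String))) : Prop := out = mapUGraphToNetwork_alt edge_list network
instance (edge_list : List (String × String)) (network : List (String × List (Int × String))) (out : List (String × List (Int × String))) : Decidable (Spec_mapUGraphToNetwork edge_list network out) := by unfold Spec_mapUGraphToNetwork; infer_instance

-- ===== CLAIM (what is proved, stated in full; the proofs are below) =====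
def Claim_equal_mapUGraphToNetwork : Prop := ∀ (edge_list : List (String × String)) (network : List (String × List (Int × String))), Dom_mapUGraphToNetwork edge_list network → Pre_mapUGraphToNetwork edge_list network → Spec_mapUGraphToNetwork edge_list network (mapUGraphToNetwork edge_list network)

-- ===== LEMMAS AND PROOFS =====

-- A's filtered add-loop is B's add-loop over the filtered list.
theorem pvFoldFilter (key : String) (dst : String) (nbrs : List (Int × String))
    (sub : PySem.Dict String (List (Int × String))) :
    nbrs.foldl (fun sub p => if p.2 == dst then pvAddHit sub key (p.1, dst) else sub) sub
      = (nbrs.filter (fun p => p.2 == dst)).foldl (fun sub hit => pvAddHit sub key hit) sub := by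
  induction nbrs generalizing sub with
  | nil => rfl
  | cons p rest ih =>
    simp only [List.foldl_cons, List.filter_cons]
    by_cases h : (p.2 == dst) = true
    · have hp : (p.1, dst) = p := by
        obtain ⟨a, b⟩ := p
        simp only [Prod.mk.injEq, true_and]
        exact (eq_of_beq h).symm
      rw [if_pos h, if_pos h, hp, List.foldl_cons]
      exact ih _
    · rw [if_neg h, if_neg h]
      exact ih sub

-- the inner index-building fold, read back through getD
theorem pvInnerIdx (src src' dst : String) (ns : List (Int × String))
    (idx : PySem.Dict (String × String) (List (Int × String))) :
    (ns.foldl (fun idx p => PySem.Dict.insert idx (src, p.2) (idx.getD (src, p.2) [] ++ [p])) idx).getD (src', dst) []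
      = idx.getD (src', dst) [] ++ (if src' = src then ns.filter (fun p => p.2 == dst) else []) := by
  induction ns generalizing idx with
  | nil => simp
  | cons p rest ih =>
    simp only [List.foldl_cons, List.filter_cons, ih]
    rw [PySem.Dict.getD_insert]
    by_cases hs : src' = src
    · subst hs
      by_cases hd : (p.2 == dst) = true
      · have hd' : dst = p.2 := (eq_of_beq hd).symm
        simp [hd', hd]
      · have hd' : ¬ ((src', dst) = (src', p.2)) := by
          simp only [Prod.mk.injEq, true_and]
          intro h; exact absurd (by simp [h] : (p.2 == dst) = true) hd
        simp [hd', hd]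
    · have hne : ¬ ((src', dst) = (src, p.2)) := by simp [hs]
      simp [hne, hs]

-- the whole index, read back through getD: exactly A's filter of the first-match neighbor list
theorem pvIdxGetD (network : List (String × List (Int × String)))
    (hnd : (network.map Prod.fst).Nodup) (src dst : String)
    (idx : PySem.Dict (String × String) (List (Int × String))) :
    (network.foldl (fun idx it =>
        it.2.foldl (fun idx p => PySem.Dict.insert idx (it.1, p.2) (idx.getD (it.1, p.2) [] ++ [p])) idx) idx).getD (src, dst) []
      = idx.getD (src, dst) [] ++
        (match (PySem.Dict.mk network).get? src with
          | some nbrs => nbrs.filter (fun p => p.2 == dst)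
          | none => []) := by
  induction network generalizing idx with
  | nil => simp [PySem.Dict.get?]
  | cons it rest ih =>
    obtain ⟨k, ns⟩ := it
    simp only [List.map_cons, List.nodup_cons] at hnd
    rw [List.foldl_cons, ih hnd.2, pvInnerIdx, PySem.Dict.get?_mk_cons]
    by_cases hk : src = k
    · subst hk
      have hrest : (PySem.Dict.mk rest).get? src = none := by
        rw [PySem.Dict.get?_eq_none_iff_not_mem_keys, PySem.Dict.keys_mk]
        exact hnd.1
      simp [hrest]
    · have hke : (k == src) = false := by
        simp only [beq_eq_false_iff_ne, ne_eq]
        exact Ne.symm hk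
      simp [hke, hk]

-- the per-edge steps of the two ports agree
theorem pvStepEq (network : List (String × List (Int × String)))
    (hnd : (network.map Prod.fst).Nodup) (st : String × String)
    (sub : PySem.Dict String (List (Int × String))) :
    (let sub :=
      match (PySem.Dict.mk network).get? st.1 with
      | some nbrs => nbrs.foldl (fun sub p => if p.2 == st.2 then pvAddHit sub st.1 (p.1, st.2) else sub) sub
      | none => sub
     match (PySem.Dict.mk network).get? st.2 with
      | some nbrs => nbrs.foldl (fun sub p => if p.2 == st.1 then pvAddHit sub st.2 (p.1, st.1) else sub) sub
      | none => sub)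
    = [(st.1, st.2), (st.2, st.1)].foldl (fun sub sd =>
        ((pvBuildIndex network).getD sd []).foldl (fun sub hit => pvAddHit sub sd.1 hit) sub) sub := by
  have hidx : ∀ src dst, (pvBuildIndex network).getD (src, dst) []
      = (match (PySem.Dict.mk network).get? src with
          | some nbrs => nbrs.filter (fun p => p.2 == dst)
          | none => []) := by
    intro src dst
    have := pvIdxGetD network hnd src dst PySem.Dict.empty
    simpa [pvBuildIndex] using this
  simp only [List.foldl_cons, List.foldl_nil, hidx]
  cases h1 : (PySem.Dict.mk network).get? st.1 <;>
    cases h2 : (PySem.Dict.mk network).get? st.2 <;>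
      simp only [List.foldl_nil, pvFoldFilter]

-- ===== VERDICT (by name: the statement is the Claim_ definition above) =====
theorem mapUGraphToNetwork_spec : Claim_equal_mapUGraphToNetwork := by
  intro edge_list network _ hpre
  show mapUGraphToNetwork edge_list network = mapUGraphToNetwork_alt edge_list network
  have hstep : (fun (sub : PySem.Dict String (List (Int × String))) (st : String × String) =>
      let sub :=
        match (PySem.Dict.mk network).get? st.1 with
        | some nbrs => nbrs.foldl (fun sub p => if p.2 == st.2 then pvAddHit sub st.1 (p.1, st.2) else sub) sub
        | none => sub
      match (PySem.Dict.mk network).get? st.2 with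
      | some nbrs => nbrs.foldl (fun sub p => if p.2 == st.1 then pvAddHit sub st.2 (p.1, st.1) else sub) sub
      | none => sub)
    = (fun (sub : PySem.Dict String (List (Int × String))) (st : String × String) =>
        [(st.1, st.2), (st.2, st.1)].foldl (fun sub sd =>
          ((pvBuildIndex network).getD sd []).foldl (fun sub hit => pvAddHit sub sd.1 hit) sub) sub) := by
    funext sub st
    exact pvStepEq network hpre st sub
  unfold mapUGraphToNetwork mapUGraphToNetwork_alt
  rw [hstep]
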